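-- pv_equiv track=rewrite | github.com/syang0624/CS110 | Final Assignment/brute_force.py | bf_get_match
-- ===== SOURCE A (Python) =====
-- def bf_get_match(x, y, k):
--     """
--     Finds all common length-k substrings of x and y
--     with brute force on both strings.
--     Input:
--     - x, y: strings
--     - k: int, length of substring
--     Output:
--     - A list of tuples (i, j) where x[i:i+k] = y[j:j+k]
--     """
--
--     common_substrings = []
--     m = len(x)
--     n = len(y)
--     for i in range(m - k + 1):
--         for j in range(n - k + 1):
--             #Iterate through all possible substrings to get all common substrings of x and y
--             if x[i:i+k] == y[j:j+k]:
--                 common_substrings.append((i, j))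
--
--     #return the list of common substrings
--     return common_substrings
-- ===== SOURCE B (Python) =====
-- def bf_get_match(x, y, k):
--     """
--     Same result as the brute-force version: indexes y's length-k
--     substrings in a dict mapping substring -> ascending list of positions j,
--     then does one dict lookup per position i of x.
--     """
--     index = {}
--     for j in range(len(y) - k + 1):
--         index.setdefault(y[j:j+k], []).append(j)
--     empty = []
--     return [(i, j)
--             for i in range(len(x) - k + 1)
--             for j in index.get(x[i:i+k], empty)]
-- ===== Notes on version B (the rewrite author's own statement) =====
-- stated objective: alternative
-- what changed: Replaces the nested brute-force scan by a dict that groups y's k-substring positions once, then one hash lookup per position of x, emitting the same (i,j) pairs in the same order; comparisons drop from O(m*n*k) to O((m+n)*k + output), though on match-dense inputs the Theta(m*n)-sized output dominates both.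
import Mathlib
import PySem

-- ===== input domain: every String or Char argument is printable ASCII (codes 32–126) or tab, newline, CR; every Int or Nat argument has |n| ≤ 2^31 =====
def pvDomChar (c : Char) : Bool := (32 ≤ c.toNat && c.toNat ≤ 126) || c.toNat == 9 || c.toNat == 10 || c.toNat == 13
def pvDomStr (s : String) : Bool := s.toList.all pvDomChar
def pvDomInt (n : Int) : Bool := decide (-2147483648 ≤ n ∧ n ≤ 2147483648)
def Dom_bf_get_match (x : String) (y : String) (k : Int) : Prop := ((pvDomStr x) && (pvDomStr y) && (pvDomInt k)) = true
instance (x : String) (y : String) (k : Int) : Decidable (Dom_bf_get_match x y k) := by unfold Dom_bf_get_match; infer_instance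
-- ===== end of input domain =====

-- B replaces A's nested brute-force scan by a dict grouping y's k-substring positions,
-- with one lookup per position of x; same output pairs in the same order (objective: alternative).


-- ===== PORT A =====
def bf_get_match (x : String) (y : String) (k : Int) : List (Int × Int) :=
  let xs := x.toList
  let ys := y.toList
  let m : Int := xs.length
  let n : Int := ys.length
  (PySem.List.pyRange 0 (m - k + 1) 1).foldl (fun acc i =>
    (PySem.List.pyRange 0 (n - k + 1) 1).foldl (fun acc j =>
      if PySem.List.slice xs (some i) (some (i + k)) == PySem.List.slice ys (some j) (some (j + k))
      then acc ++ [(i, j)] else acc) acc) []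

-- ===== PORT B =====
def bf_get_match_alt (x : String) (y : String) (k : Int) : List (Int × Int) :=
  let xs := x.toList
  let ys := y.toList
  -- index.setdefault(y[j:j+k], []).append(j)  ==  modify key [] (· ++ [j])
  let index : PySem.Dict (List Char) (List Int) :=
    (PySem.List.pyRange 0 ((ys.length : Int) - k + 1) 1).foldl
      (fun d j => d.modify (PySem.List.slice ys (some j) (some (j + k))) [] (· ++ [j]))
      PySem.Dict.empty
  (PySem.List.pyRange 0 ((xs.length : Int) - k + 1) 1).foldl
    (fun acc i =>
      acc ++ (index.getD (PySem.List.slice xs (some i) (some (i + k))) []).map (fun j => (i, j)))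
    []

-- ===== PRECONDITION & SPEC =====
def Spec_bf_get_match (x : String) (y : String) (k : Int) (out : List (Int × Int)) : Prop := out = bf_get_match_alt x y k
instance (x : String) (y : String) (k : Int) (out : List (Int × Int)) : Decidable (Spec_bf_get_match x y k out) := by unfold Spec_bf_get_match; infer_instance

-- ===== CLAIM (what is proved, stated in full; the proofs are below) =====
def Claim_equal_bf_get_match : Prop := ∀ (x : String) (y : String) (k : Int), Dom_bf_get_match x y k → Spec_bf_get_match x y k (bf_get_match x y k)

-- ===== LEMMAS AND PROOFS =====

-- B's index lookup is exactly the filter of y's positions whose k-slice equals the key.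
theorem pv_index_getD (ys : List Char) (k : Int) (s : List Char) :
    ((PySem.List.pyRange 0 ((ys.length : Int) - k + 1) 1).foldl
      (fun d j => d.modify (PySem.List.slice ys (some j) (some (j + k))) [] (· ++ [j]))
      (PySem.Dict.empty : PySem.Dict (List Char) (List Int))).getD s []
    = (PySem.List.pyRange 0 ((ys.length : Int) - k + 1) 1).filter
        (fun j => PySem.List.slice ys (some j) (some (j + k)) == s) := by
  have h := PySem.Dict.getD_foldl_modify_append
    (l := (PySem.List.pyRange 0 ((ys.length : Int) - k + 1) 1).map
      (fun j => (PySem.List.slice ys (some j) (some (j + k)), j)))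
    (d := (PySem.Dict.empty : PySem.Dict (List Char) (List Int))) (c := s)
  rw [List.foldl_map] at h
  simpa [List.filter_map, Function.comp_def] using h

-- A's inner loop over j is the same filter, mapped to pairs, appended to acc.
theorem pv_inner (ys : List Char) (k : Int) (s : List Char) (i : Int) (acc : List (Int × Int)) :
    (PySem.List.pyRange 0 ((ys.length : Int) - k + 1) 1).foldl
      (fun acc j => if s == PySem.List.slice ys (some j) (some (j + k))
        then acc ++ [(i, j)] else acc) acc
    = acc ++ ((PySem.List.pyRange 0 ((ys.length : Int) - k + 1) 1).filter
        (fun j => PySem.List.slice ys (some j) (some (j + k)) == s)).map (fun j => (i, j)) := by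
  rw [PySem.List.foldl_append_if]
  congr 1
  congr 1
  apply List.filter_congr
  intro j _
  simp [BEq.comm]

-- ===== VERDICT (by name: the statement is the Claim_ definition above) =====
theorem bf_get_match_spec : Claim_equal_bf_get_match := by
  intro x y k _
  unfold Spec_bf_get_match bf_get_match bf_get_match_alt
  simp only []
  congr 1
  funext acc i
  rw [pv_inner, pv_index_getD]
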